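-- pv_equiv track=rewrite | github.com/WillemKauf/AdventOfCode | 2018/11.py | create_grids
-- ===== SOURCE A (Python) =====
-- def create_grids(num, n):
--     grid = [[0 for i in range(0, n)] for j in range(0, n)]
--     for j in range(0, n):
--         for i in range(0, n):
--             r_ID       = i+10
--             pwr_level  = ((((r_ID*j + num)*r_ID)%1000)//100)-5
--             grid[j][i] = pwr_level
--     sum_grid = [[0 for i in range(0, n)] for j in range(0, n)]
--
--     for j in range(0, n):
--         for i in range(0, n):
--             sum_grid[j][i] = grid[j][i]
--             if j > 0:
--                 sum_grid[j][i] += sum_grid[j-1][i]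
--             if i > 0:
--                 sum_grid[j][i] += sum_grid[j][i-1]
--             if i > 0 and j > 0:
--                 sum_grid[j][i] -= sum_grid[j-1][i-1]
--     return grid, sum_grid
-- ===== SOURCE B (Python) =====
-- def create_grids(num, n):
--     # Same power-level formula, but the summed-area table is built by two
--     # separable sweeps (row prefix sums, then column accumulation) instead of
--     # the single inclusion-exclusion pass.
--     grid = [[((i + 10) * j + num) * (i + 10) % 1000 // 100 - 5 for i in range(n)]
--             for j in range(n)]
--     row_sums = []
--     for row in grid:
--         acc = 0
--         srow = []
--         for v in row:
--             acc += v
--             srow.append(acc)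
--         row_sums.append(srow)
--     sum_grid = []
--     prev = [0] * n if n > 0 else []
--     for srow in row_sums:
--         cur = [a + b for a, b in zip(srow, prev)]
--         sum_grid.append(cur)
--         prev = cur
--     return grid, sum_grid
-- ===== Notes on version B (the rewrite author's own statement) =====
-- stated objective: alternative
-- what changed: The summed-area table is built by two separable sweeps (row-wise prefix sums, then a column-wise accumulation of whole rows) instead of A's single pass with the +up+left-diagonal inclusion-exclusion recurrence, and the grid becomes a comprehension instead of in-place assignment into a zero grid.
import Mathlib
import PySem

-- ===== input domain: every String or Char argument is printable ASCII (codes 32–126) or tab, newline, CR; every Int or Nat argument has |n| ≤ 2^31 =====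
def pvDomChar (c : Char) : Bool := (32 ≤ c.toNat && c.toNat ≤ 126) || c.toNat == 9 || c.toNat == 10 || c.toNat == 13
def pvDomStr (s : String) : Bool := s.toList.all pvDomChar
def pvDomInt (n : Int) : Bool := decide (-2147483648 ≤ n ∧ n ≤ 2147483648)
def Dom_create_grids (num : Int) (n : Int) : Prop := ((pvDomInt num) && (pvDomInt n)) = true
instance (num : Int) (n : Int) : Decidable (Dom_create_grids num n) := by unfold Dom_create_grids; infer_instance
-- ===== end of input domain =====

-- B builds the summed-area table by two separable sweeps (row prefix sums, then
-- column accumulation) instead of A's single inclusion-exclusion pass; same values.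

-- ===== PORT A =====
-- power-level formula (exact: PySem.Int.mod / floordiv are Python's % and //)
def pvPwr (num j i : Int) : Int :=
  let rID := i + 10
  PySem.Int.floordiv (PySem.Int.mod ((rID * j + num) * rID) 1000) 100 - 5

-- 2-D indexing helpers for A's in-place updates; every index used is a loop
-- counter ≥ 0 and in range (j-1 / i-1 only behind 0 < j / 0 < i guards), where
-- `.toNat`-based getD/set is exactly Python's g[j][i] read / assignment.
def pvGet2 (g : List (List Int)) (j i : Int) : Int := (g.getD j.toNat []).getD i.toNat 0
def pvSet2 (g : List (List Int)) (j i : Int) (v : Int) : List (List Int) :=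
  g.set j.toNat ((g.getD j.toNat []).set i.toNat v)

def create_grids (num : Int) (n : Int) : List (List Int) × List (List Int) :=
  let grid0 := (PySem.List.pyRange 0 n 1).map (fun _ => (PySem.List.pyRange 0 n 1).map (fun _ => (0:Int)))
  let grid := (PySem.List.pyRange 0 n 1).foldl (fun g j =>
    (PySem.List.pyRange 0 n 1).foldl (fun g i => pvSet2 g j i (pvPwr num j i)) g) grid0
  let sum0 := (PySem.List.pyRange 0 n 1).map (fun _ => (PySem.List.pyRange 0 n 1).map (fun _ => (0:Int)))
  let sumg := (PySem.List.pyRange 0 n 1).foldl (fun sg j =>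
    (PySem.List.pyRange 0 n 1).foldl (fun sg i =>
      let sg := pvSet2 sg j i (pvGet2 grid j i)
      let sg := if 0 < j then pvSet2 sg j i (pvGet2 sg j i + pvGet2 sg (j-1) i) else sg
      let sg := if 0 < i then pvSet2 sg j i (pvGet2 sg j i + pvGet2 sg j (i-1)) else sg
      let sg := if 0 < i ∧ 0 < j then pvSet2 sg j i (pvGet2 sg j i - pvGet2 sg (j-1) (i-1)) else sg
      sg) sg) sum0
  (grid, sumg)

-- ===== PORT B =====
-- acc = 0; srow = []; for v in row: acc += v; srow.append(acc)
def pvScanRow (row : List Int) : List Int :=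
  (row.foldl (fun (s : Int × List Int) v => (s.1 + v, s.2 ++ [s.1 + v])) ((0:Int), ([]:List Int))).2

-- for srow in row_sums: cur = [a+b for a,b in zip(srow, prev)]; append; prev = cur
def pvColPass : List Int → List (List Int) → List (List Int)
  | _, [] => []
  | prev, r :: rs => let cur := List.zipWith (· + ·) r prev; cur :: pvColPass cur rs

def create_grids_alt (num : Int) (n : Int) : List (List Int) × List (List Int) :=
  let grid := (PySem.List.pyRange 0 n 1).map (fun j => (PySem.List.pyRange 0 n 1).map (fun i =>
    PySem.Int.floordiv (PySem.Int.mod (((i + 10) * j + num) * (i + 10)) 1000) 100 - 5))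
  let row_sums := grid.map pvScanRow
  let prev0 := if 0 < n then List.replicate n.toNat (0:Int) else []  -- [0] * n if n > 0 else []
  (grid, pvColPass prev0 row_sums)

-- ===== PRECONDITION & SPEC =====
def Spec_create_grids (num : Int) (n : Int) (out : List (List Int) × List (List Int)) : Prop := out = create_grids_alt num n
instance (num : Int) (n : Int) (out : List (List Int) × List (List Int)) : Decidable (Spec_create_grids num n out) := by unfold Spec_create_grids; infer_instance

-- ===== CLAIM (what is proved, stated in full; the proofs are below) =====
def Claim_equal_create_grids : Prop := ∀ (num : Int) (n : Int), Dom_create_grids num n → Spec_create_grids num n (create_grids num n)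

-- ===== LEMMAS AND PROOFS =====

-- the cell value and the row-prefix / summed-area recurrences
def pvG (num : Int) (j i : Nat) : Int := pvPwr num (j:Int) (i:Int)

def pvPre (f : Nat → Int) : Nat → Int
  | 0 => 0
  | k+1 => pvPre f k + f k

def pvP (num : Int) (j i : Nat) : Int := pvPre (pvG num j) (i+1)

def pvS (num : Int) : Nat → Nat → Int
  | 0, i => pvP num 0 i
  | j+1, i => pvS num j i + pvP num (j+1) i

def pvTbl (m : Nat) (F : Nat → Nat → Int) : List (List Int) :=
  (List.range m).map (fun j => (List.range m).map (F j))

def pvFpart (T : Nat → Nat → Int) (j i : Nat) : Nat → Nat → Int :=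
  fun j' i' => if j' < j ∨ (j' = j ∧ i' < i) then T j' i' else 0

def pvU (F : Nat → Nat → Int) (j i : Nat) (w : Int) : Nat → Nat → Int :=
  fun j' i' => if j' = j ∧ i' = i then w else F j' i'

def pvAcc (prev : Nat → Int) (rf : Nat → Nat → Int) : Nat → Nat → Int
  | 0, i => rf 0 i + prev i
  | j+1, i => rf (j+1) i + pvAcc prev rf j i

lemma pyRange0 (n : Int) : PySem.List.pyRange 0 n 1 = (List.range n.toNat).map (fun (k : Nat) => (k:Int)) := by
  rw [PySem.List.pyRange_one]
  simp only [Int.sub_zero, zero_add]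

lemma tbl_congr {m : Nat} {F F' : Nat → Nat → Int}
    (h : ∀ j i, j < m → i < m → F j i = F' j i) : pvTbl m F = pvTbl m F' := by
  unfold pvTbl
  refine List.map_congr_left (fun j hj => ?_)
  refine List.map_congr_left (fun i hi => ?_)
  exact h j i (List.mem_range.mp hj) (List.mem_range.mp hi)

lemma getD_map_range' {α : Type} (f : Nat → α) (d : α) {m j : Nat} (hj : j < m) :
    ((List.range m).map f).getD j d = f j := by
  rw [List.getD_eq_getElem _ _ (by simpa using hj)]
  simp

lemma set_map_range {α : Type} (f : Nat → α) (v : α) {m j : Nat} (hj : j < m) :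
    ((List.range m).map f).set j v = (List.range m).map (fun k => if k = j then v else f k) := by
  apply List.ext_getElem
  · simp
  · intro k h1 h2
    simp only [List.getElem_set, List.getElem_map, List.getElem_range]
    split_ifs with h h' h'
    · rfl
    · omega
    · omega
    · rfl

lemma get2_tbl {m : Nat} (F : Nat → Nat → Int) {j i : Nat} (hj : j < m) (hi : i < m) :
    pvGet2 (pvTbl m F) (j:Int) (i:Int) = F j i := by
  unfold pvGet2 pvTbl
  rw [Int.toNat_natCast, Int.toNat_natCast, getD_map_range' _ _ hj, getD_map_range' _ _ hi]

lemma set2_tbl {m : Nat} (F : Nat → Nat → Int) {j i : Nat} (v : Int) (hj : j < m) (hi : i < m) :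
    pvSet2 (pvTbl m F) (j:Int) (i:Int) v = pvTbl m (pvU F j i v) := by
  unfold pvSet2 pvTbl pvU
  rw [Int.toNat_natCast, Int.toNat_natCast, getD_map_range' _ _ hj,
    set_map_range _ _ hi, set_map_range _ _ hj]
  refine List.map_congr_left (fun j' hj' => ?_)
  by_cases h : j' = j
  · subst h
    simp only [if_pos (rfl : j' = j')]
    refine List.map_congr_left (fun i' _ => ?_)
    by_cases h' : i' = i <;> simp [h']
  · simp only [if_neg h]
    refine List.map_congr_left (fun i' _ => ?_)
    simp [h]

lemma U_U (F : Nat → Nat → Int) (j i : Nat) (w v : Int) :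
    pvU (pvU F j i w) j i v = pvU F j i v := by
  funext j' i'
  unfold pvU
  by_cases h : j' = j ∧ i' = i <;> simp [h]

lemma get2_U_self {m : Nat} (F : Nat → Nat → Int) {j i : Nat} (w : Int) (hj : j < m) (hi : i < m) :
    pvGet2 (pvTbl m (pvU F j i w)) (j:Int) (i:Int) = w := by
  rw [get2_tbl _ hj hi]
  simp [pvU]

lemma get2_U_other {m : Nat} (F : Nat → Nat → Int) {j i j' i' : Nat} (w : Int)
    (hj' : j' < m) (hi' : i' < m) (h : ¬(j' = j ∧ i' = i)) :
    pvGet2 (pvTbl m (pvU F j i w)) (j':Int) (i':Int) = F j' i' := by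
  rw [get2_tbl _ hj' hi']
  exact if_neg h

-- generic fold-over-one-row / fold-over-rows lemmas
lemma inner_fold {m j : Nat} (step : List (List Int) → Nat → List (List Int)) (T : Nat → Nat → Int)
    (hstep : ∀ i, i < m → step (pvTbl m (pvFpart T j i)) i = pvTbl m (pvFpart T j (i+1))) :
    ∀ k, k ≤ m → (List.range k).foldl step (pvTbl m (pvFpart T j 0)) = pvTbl m (pvFpart T j k) := by
  intro k
  induction k with
  | zero => intro _; rfl
  | succ k ih =>
    intro hk
    rw [List.range_succ, List.foldl_append, ih (by omega), List.foldl_cons, List.foldl_nil,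
      hstep k (by omega)]

lemma outer_fold {m : Nat} (rowstep : List (List Int) → Nat → List (List Int)) (T : Nat → Nat → Int)
    (hrow : ∀ j, j < m → rowstep (pvTbl m (pvFpart T j 0)) j = pvTbl m (pvFpart T (j+1) 0)) :
    ∀ k, k ≤ m → (List.range k).foldl rowstep (pvTbl m (pvFpart T 0 0)) = pvTbl m (pvFpart T k 0) := by
  intro k
  induction k with
  | zero => intro _; rfl
  | succ k ih =>
    intro hk
    rw [List.range_succ, List.foldl_append, ih (by omega), List.foldl_cons, List.foldl_nil,
      hrow k (by omega)]

lemma row_shift {m : Nat} (T : Nat → Nat → Int) (j : Nat) :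
    pvTbl m (pvFpart T j m) = pvTbl m (pvFpart T (j+1) 0) := by
  refine tbl_congr (fun j' i' hj' hi' => ?_)
  unfold pvFpart
  split_ifs with h h' h' <;> first | rfl | omega

lemma zero_tbl (m : Nat) (T : Nat → Nat → Int) :
    pvTbl m (fun _ _ => (0:Int)) = pvTbl m (pvFpart T 0 0) := by
  refine tbl_congr (fun j' i' _ _ => ?_)
  simp [pvFpart]

-- phase 1: A's grid-filling double loop produces the table of pvG
lemma phaseA_grid (num : Int) (m : Nat) :
    ((List.range m).map (fun (k : Nat) => (k:Int))).foldl (fun g j =>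
        ((List.range m).map (fun (k : Nat) => (k:Int))).foldl (fun g i => pvSet2 g j i (pvPwr num j i)) g)
      (pvTbl m (fun _ _ => 0)) = pvTbl m (pvG num) := by
  rw [zero_tbl m (pvG num), List.foldl_map]
  rw [outer_fold _ (pvG num) ?_ m le_rfl]
  · refine tbl_congr (fun j' i' hj' _ => ?_)
    unfold pvFpart
    rw [if_pos (Or.inl hj')]
  · intro j hj
    rw [List.foldl_map, inner_fold _ (pvG num) ?_ m le_rfl, row_shift]
    intro i hi
    rw [set2_tbl _ _ hj hi]
    refine tbl_congr (fun j' i' _ _ => ?_)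
    unfold pvU
    by_cases h : j' = j ∧ i' = i
    · obtain ⟨rfl, rfl⟩ := h
      rw [if_pos (⟨rfl, rfl⟩ : j' = j' ∧ i' = i')]
      show pvG num j' i' = pvFpart (pvG num) j' (i' + 1) j' i'
      unfold pvFpart
      rw [if_pos (Or.inr ⟨rfl, Nat.lt_succ_self i'⟩)]
    · rw [if_neg h]
      unfold pvFpart
      split_ifs with h1 h2 <;> first | rfl | omega

-- the inclusion-exclusion recurrence satisfied by the summed-area table pvS
lemma P_step (num : Int) (j i : Nat) (hi : 0 < i) :
    pvP num j i = pvP num j (i-1) + pvG num j i := by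
  obtain ⟨i, rfl⟩ : ∃ k, i = k + 1 := ⟨i - 1, by omega⟩
  simp [pvP, pvPre]

lemma S_rec (num : Int) (j i : Nat) :
    pvS num j i = pvG num j i
      + (if 0 < j then pvS num (j-1) i else 0)
      + (if 0 < i then pvS num j (i-1) else 0)
      - (if 0 < i ∧ 0 < j then pvS num (j-1) (i-1) else 0) := by
  cases j with
  | zero =>
    cases i with
    | zero => simp [pvS, pvP, pvPre]
    | succ i =>
      simp only [Nat.lt_irrefl, Nat.succ_sub_one, if_pos (Nat.succ_pos i)]
      simp [pvS, pvP, pvPre]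
      ring
  | succ j =>
    cases i with
    | zero =>
      simp only [Nat.succ_sub_one, if_pos (Nat.succ_pos j), if_neg (by omega : ¬ (0:Nat) < 0),
        if_neg (by omega : ¬ (0 < 0 ∧ 0 < j + 1))]
      show pvS num j 0 + pvP num (j+1) 0 = _
      simp [pvP, pvPre]
      ring
    | succ i =>
      have h1 : pvS num (j+1) (i+1) = pvS num j (i+1) + pvP num (j+1) (i+1) := rfl
      have h2 : pvP num (j+1) (i+1) = pvP num (j+1) i + pvG num (j+1) (i+1) := by
        simpa using P_step num (j+1) (i+1) (by omega)
      have h3 : pvS num (j+1) i = pvS num j i + pvP num (j+1) i := rfl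
      simp only [if_pos (Nat.succ_pos j), if_pos (Nat.succ_pos i),
        if_pos (And.intro (Nat.succ_pos i) (Nat.succ_pos j)), Nat.succ_sub_one]
      rw [h1, h2]
      omega

-- one step of A's inclusion-exclusion pass, on the partially-filled table
lemma sum_step (num : Int) {m j i : Nat} (hj : j < m) (hi : i < m) :
    (let sg1 := pvSet2 (pvTbl m (pvFpart (pvS num) j i)) (j:Int) (i:Int)
                  (pvGet2 (pvTbl m (pvG num)) (j:Int) (i:Int))
     let sg2 := if 0 < (j:Int) then
         pvSet2 sg1 (j:Int) (i:Int) (pvGet2 sg1 (j:Int) (i:Int) + pvGet2 sg1 ((j:Int)-1) (i:Int)) else sg1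
     let sg3 := if 0 < (i:Int) then
         pvSet2 sg2 (j:Int) (i:Int) (pvGet2 sg2 (j:Int) (i:Int) + pvGet2 sg2 (j:Int) ((i:Int)-1)) else sg2
     let sg4 := if 0 < (i:Int) ∧ 0 < (j:Int) then
         pvSet2 sg3 (j:Int) (i:Int) (pvGet2 sg3 (j:Int) (i:Int) - pvGet2 sg3 ((j:Int)-1) ((i:Int)-1)) else sg3
     sg4) = pvTbl m (pvFpart (pvS num) j (i+1)) := by
  have ej : 0 < j → ((j:Int) - 1) = ((j - 1 : Nat) : Int) := by omega
  have ei : 0 < i → ((i:Int) - 1) = ((i - 1 : Nat) : Int) := by omega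
  set F0 := pvFpart (pvS num) j i with hF0
  -- evaluate the chain: every intermediate table is pvTbl m (pvU F0 j i w)
  simp only []
  rw [get2_tbl _ hj hi, set2_tbl _ _ hj hi]
  -- w1 = pvG j i
  have step2 : (if 0 < (j:Int) then
      pvSet2 (pvTbl m (pvU F0 j i (pvG num j i))) (j:Int) (i:Int)
        (pvGet2 (pvTbl m (pvU F0 j i (pvG num j i))) (j:Int) (i:Int)
          + pvGet2 (pvTbl m (pvU F0 j i (pvG num j i))) ((j:Int)-1) (i:Int))
    else pvTbl m (pvU F0 j i (pvG num j i))) =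
      pvTbl m (pvU F0 j i (pvG num j i + (if 0 < j then pvS num (j-1) i else 0))) := by
    by_cases hjz : 0 < j
    · rw [if_pos (by omega : 0 < (j:Int)), get2_U_self _ _ hj hi, ej hjz,
        get2_U_other _ _ (by omega) hi (by omega), set2_tbl _ _ hj hi, U_U, if_pos hjz]
      rw [hF0]
      unfold pvFpart
      rw [if_pos (Or.inl (by omega))]
    · rw [if_neg (by omega : ¬ 0 < (j:Int)), if_neg hjz, add_zero]
  rw [step2]
  set w2 := pvG num j i + (if 0 < j then pvS num (j-1) i else 0) with hw2
  have step3 : (if 0 < (i:Int) then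
      pvSet2 (pvTbl m (pvU F0 j i w2)) (j:Int) (i:Int)
        (pvGet2 (pvTbl m (pvU F0 j i w2)) (j:Int) (i:Int)
          + pvGet2 (pvTbl m (pvU F0 j i w2)) (j:Int) ((i:Int)-1))
    else pvTbl m (pvU F0 j i w2)) =
      pvTbl m (pvU F0 j i (w2 + (if 0 < i then pvS num j (i-1) else 0))) := by
    by_cases hiz : 0 < i
    · rw [if_pos (by omega : 0 < (i:Int)), get2_U_self _ _ hj hi, ei hiz,
        get2_U_other _ _ hj (by omega) (by omega), set2_tbl _ _ hj hi, U_U, if_pos hiz]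
      rw [hF0]
      unfold pvFpart
      rw [if_pos (Or.inr ⟨rfl, by omega⟩)]
    · rw [if_neg (by omega : ¬ 0 < (i:Int)), if_neg hiz, add_zero]
  rw [step3]
  set w3 := w2 + (if 0 < i then pvS num j (i-1) else 0) with hw3
  have step4 : (if 0 < (i:Int) ∧ 0 < (j:Int) then
      pvSet2 (pvTbl m (pvU F0 j i w3)) (j:Int) (i:Int)
        (pvGet2 (pvTbl m (pvU F0 j i w3)) (j:Int) (i:Int)
          - pvGet2 (pvTbl m (pvU F0 j i w3)) ((j:Int)-1) ((i:Int)-1))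
    else pvTbl m (pvU F0 j i w3)) =
      pvTbl m (pvU F0 j i (w3 - (if 0 < i ∧ 0 < j then pvS num (j-1) (i-1) else 0))) := by
    by_cases hb : 0 < i ∧ 0 < j
    · rw [if_pos (by omega : 0 < (i:Int) ∧ 0 < (j:Int)), get2_U_self _ _ hj hi,
        ej hb.2, ei hb.1, get2_U_other _ _ (by omega) (by omega) (by omega),
        set2_tbl _ _ hj hi, U_U, if_pos hb]
      rw [hF0]
      unfold pvFpart
      rw [if_pos (Or.inl (by omega))]
    · rw [if_neg (by omega : ¬ (0 < (i:Int) ∧ 0 < (j:Int))), if_neg hb, sub_zero]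
  rw [step4]
  refine tbl_congr (fun j' i' _ _ => ?_)
  unfold pvU
  by_cases h : j' = j ∧ i' = i
  · obtain ⟨rfl, rfl⟩ := h
    rw [if_pos (⟨rfl, rfl⟩ : j' = j' ∧ i' = i')]
    show _ = pvFpart (pvS num) j' (i' + 1) j' i'
    unfold pvFpart
    rw [if_pos (Or.inr ⟨rfl, Nat.lt_succ_self i'⟩)]
    exact (S_rec num j' i').symm
  · rw [if_neg h, hF0]
    unfold pvFpart
    split_ifs with h1 h2 h2 <;> first | rfl | omega

-- phase 2: A's single inclusion-exclusion pass produces the table of pvS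
lemma phaseA_sum (num : Int) (m : Nat) :
    ((List.range m).map (fun (k : Nat) => (k:Int))).foldl (fun sg j =>
        ((List.range m).map (fun (k : Nat) => (k:Int))).foldl (fun sg i =>
          let sg1 := pvSet2 sg j i (pvGet2 (pvTbl m (pvG num)) j i)
          let sg2 := if 0 < j then pvSet2 sg1 j i (pvGet2 sg1 j i + pvGet2 sg1 (j-1) i) else sg1
          let sg3 := if 0 < i then pvSet2 sg2 j i (pvGet2 sg2 j i + pvGet2 sg2 j (i-1)) else sg2
          let sg4 := if 0 < i ∧ 0 < j then pvSet2 sg3 j i (pvGet2 sg3 j i - pvGet2 sg3 (j-1) (i-1)) else sg3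
          sg4) sg)
      (pvTbl m (fun _ _ => 0)) = pvTbl m (pvS num) := by
  rw [zero_tbl m (pvS num), List.foldl_map]
  rw [outer_fold _ (pvS num) ?_ m le_rfl]
  · refine tbl_congr (fun j' i' hj' _ => ?_)
    unfold pvFpart
    rw [if_pos (Or.inl hj')]
  · intro j hj
    rw [List.foldl_map, inner_fold _ (pvS num) ?_ m le_rfl, row_shift]
    intro i hi
    exact sum_step num hj hi

-- characterization of A
lemma a_spec (num n : Int) :
    create_grids num n = (pvTbl n.toNat (pvG num), pvTbl n.toNat (pvS num)) := by
  unfold create_grids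
  simp only [pyRange0]
  have hz : ((List.range n.toNat).map (fun (k : Nat) => (k:Int))).map
      (fun _ => ((List.range n.toNat).map (fun (k : Nat) => (k:Int))).map (fun _ => (0:Int)))
      = pvTbl n.toNat (fun _ _ => 0) := by
    simp [pvTbl, Function.comp_def]
  rw [hz, phaseA_grid, phaseA_sum]

-- ===== B-side lemmas =====

lemma zipWith_self {α β : Type} (f : α → α → β) :
    ∀ l : List α, List.zipWith f l l = l.map (fun a => f a a)
  | [] => rfl
  | a :: l => by simpa [List.zipWith] using zipWith_self f l

lemma zipWith_map_range (f g : Nat → Int) (m : Nat) :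
    List.zipWith (· + ·) ((List.range m).map f) ((List.range m).map g)
      = (List.range m).map (fun k => f k + g k) := by
  rw [List.zipWith_map, zipWith_self]

lemma scan_inv (f : Nat → Int) :
    ∀ (k : Nat) (a : Int) (L0 : List Int),
      ((List.range k).map f).foldl (fun (s : Int × List Int) v => (s.1 + v, s.2 ++ [s.1 + v])) (a, L0)
        = (a + pvPre f k, L0 ++ (List.range k).map (fun i => a + pvPre f (i+1))) := by
  intro k
  induction k with
  | zero => intro a L0; simp [pvPre]
  | succ k ih =>
    intro a L0
    rw [List.range_succ, List.map_append, List.foldl_append, ih]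
    refine Prod.ext ?_ ?_
    · simp [pvPre, add_assoc]
    · simp [pvPre, add_assoc, List.append_assoc]

lemma scanRow_spec (f : Nat → Int) (m : Nat) :
    pvScanRow ((List.range m).map f) = (List.range m).map (fun i => pvPre f (i+1)) := by
  unfold pvScanRow
  rw [scan_inv]
  simp

lemma acc_shift (prev : Nat → Int) (rf : Nat → Nat → Int) (j i : Nat) :
    pvAcc prev rf (j+1) i = pvAcc (fun i => rf 0 i + prev i) (fun j => rf (j+1)) j i := by
  induction j with
  | zero => rfl
  | succ j ih =>
    show rf (j+1+1) i + pvAcc prev rf (j+1) i = _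
    rw [ih]
    rfl

lemma colPass_spec :
    ∀ (k m : Nat) (prev : Nat → Int) (rf : Nat → Nat → Int),
      pvColPass ((List.range m).map prev) ((List.range k).map (fun j => (List.range m).map (rf j)))
        = (List.range k).map (fun j => (List.range m).map (pvAcc prev rf j)) := by
  intro k
  induction k with
  | zero => intro m prev rf; rfl
  | succ k ih =>
    intro m prev rf
    rw [List.range_succ_eq_map, List.map_cons, List.map_cons, List.map_map, List.map_map]
    show pvColPass _ (_ :: _) = _
    unfold pvColPass
    rw [zipWith_map_range]
    simp only [Function.comp_def, Nat.succ_eq_add_one]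
    rw [ih m (fun i => rf 0 i + prev i) (fun j => rf (j+1))]
    congr 1
    refine List.map_congr_left (fun j _ => ?_)
    refine List.map_congr_left (fun i _ => ?_)
    exact (acc_shift prev rf j i).symm

lemma acc_S (num : Int) : ∀ (j i : Nat), pvAcc (fun _ => 0) (pvP num) j i = pvS num j i := by
  intro j
  induction j with
  | zero => intro i; show pvP num 0 i + 0 = pvS num 0 i; rw [add_zero]; rfl
  | succ j ih =>
    intro i
    show pvP num (j+1) i + pvAcc (fun _ => 0) (pvP num) j i = pvS num (j+1) i
    rw [ih]
    show _ = pvS num j i + pvP num (j+1) i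
    ring

-- characterization of B
lemma alt_spec (num n : Int) :
    create_grids_alt num n = (pvTbl n.toNat (pvG num), pvTbl n.toNat (pvS num)) := by
  unfold create_grids_alt
  simp only [pyRange0]
  have hgrid : ((List.range n.toNat).map (fun (k : Nat) => (k:Int))).map
      (fun j => ((List.range n.toNat).map (fun (k : Nat) => (k:Int))).map (fun i =>
        PySem.Int.floordiv (PySem.Int.mod (((i + 10) * j + num) * (i + 10)) 1000) 100 - 5))
      = pvTbl n.toNat (pvG num) := by
    simp only [List.map_map, Function.comp]
    refine tbl_congr (fun j i _ _ => ?_)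
    simp [pvG, pvPwr]
  rw [hgrid]
  have hprev : (if 0 < n then List.replicate n.toNat (0:Int) else [])
      = (List.range n.toNat).map (fun _ => (0:Int)) := by
    by_cases hn : 0 < n
    · rw [if_pos hn, List.map_const', List.length_range]
    · rw [if_neg hn]
      have : n.toNat = 0 := by omega
      rw [this]
      rfl
  rw [hprev]
  have hrows : (pvTbl n.toNat (pvG num)).map pvScanRow
      = (List.range n.toNat).map (fun j => (List.range n.toNat).map (pvP num j)) := by
    unfold pvTbl
    rw [List.map_map]
    refine List.map_congr_left (fun j _ => ?_)
    simp only [Function.comp]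
    rw [scanRow_spec]
    rfl
  rw [hrows, colPass_spec]
  refine Prod.ext rfl ?_
  show _ = pvTbl n.toNat (pvS num)
  refine tbl_congr (fun j i _ _ => ?_)
  exact acc_S num j i

-- ===== VERDICT (by name: the statement is the Claim_ definition above) =====
theorem create_grids_spec : Claim_equal_create_grids := by
  intro num n _
  unfold Spec_create_grids
  rw [a_spec, alt_spec]
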